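-- pv_equiv track=rewrite | github.com/LeeHakHo/calvin-1 | calvin_models/calvin_agent/utils/hash_utils.py | fnv1_32
-- ===== SOURCE A (Python) =====
-- def fnv1_32(s: str) -> int:
--     """Compute FNV-1 32-bit hash for the given string.
--
--     Returns an unsigned 32-bit integer.
--     """
--     # FNV-1 32-bit parameters
--     h = 0x811c9dc5
--     fnv_prime = 0x01000193
--     data = s.encode("utf-8")
--     for b in data:
--         h = (h * fnv_prime) & 0xFFFFFFFF
--         h ^= b
--     return h
-- ===== SOURCE B (Python) =====
-- def fnv1_32(s: str) -> int:
--     """Compute FNV-1 32-bit hash for the given string.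
--
--     Returns an unsigned 32-bit integer.
--     """
--     def go(data, h):
--         n = len(data)
--         if n == 0:
--             return h
--         if n == 1:
--             return ((h * 0x01000193) & 0xFFFFFFFF) ^ data[0]
--         m = n // 2
--         return go(data[m:], go(data[:m], h))
--     return go(s.encode("utf-8"), 0x811C9DC5)
-- ===== Notes on version B (the rewrite author's own statement) =====
-- stated objective: alternative
-- what changed: The single left-to-right imperative loop is replaced by a divide-and-conquer recursion on the byte string: the hash state is computed for the first half and threaded as the seed into the recursion on the second half (correct because folding the FNV step over a concatenation composes).
import Mathlib
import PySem

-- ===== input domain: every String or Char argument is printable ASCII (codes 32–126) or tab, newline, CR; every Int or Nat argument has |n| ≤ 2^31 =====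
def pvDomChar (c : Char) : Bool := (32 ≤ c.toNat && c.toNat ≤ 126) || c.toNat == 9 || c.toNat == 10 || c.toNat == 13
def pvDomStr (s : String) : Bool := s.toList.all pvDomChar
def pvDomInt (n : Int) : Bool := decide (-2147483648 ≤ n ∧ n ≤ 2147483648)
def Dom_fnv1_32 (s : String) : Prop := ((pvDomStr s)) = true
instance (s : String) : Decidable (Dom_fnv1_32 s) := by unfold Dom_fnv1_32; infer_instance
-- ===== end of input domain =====

-- B replaces A's single left-to-right loop by a divide-and-conquer recursion on the byte
-- string that threads the hash state through the two halves (objective: alternative).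
-- On the stated ASCII domain, s.encode("utf-8") is exactly the list of character codes,
-- so both ports take the bytes as s.toList.map Char.toNat.

-- ===== PORT A =====
def fnv1_32 (s : String) : Int :=
  ((s.toList.map Char.toNat).foldl
    (fun (h b : Nat) => ((h * 16777619) % 4294967296) ^^^ b) 2166136261 : Nat)

-- ===== PORT B =====
def fnvStep (h b : Nat) : Nat := ((h * 16777619) % 4294967296) ^^^ b

-- fuel (passed as data.length, never exhausted) only makes the halving recursion structural
def fnvGo : Nat → List Nat → Nat → Nat
  | 0, _, h => h
  | fuel + 1, data, h =>
    if data.length = 0 then h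
    else if data.length = 1 then fnvStep h data.headI
    else
      let m := data.length / 2
      fnvGo fuel (data.drop m) (fnvGo fuel (data.take m) h)

def fnv1_32_alt (s : String) : Int :=
  let data := s.toList.map Char.toNat
  (fnvGo data.length data 2166136261 : Nat)

-- ===== PRECONDITION & SPEC =====
def Spec_fnv1_32 (s : String) (out : Int) : Prop := out = fnv1_32_alt s
instance (s : String) (out : Int) : Decidable (Spec_fnv1_32 s out) := by unfold Spec_fnv1_32; infer_instance

-- ===== CLAIM (what is proved, stated in full; the proofs are below) =====
def Claim_equal_fnv1_32 : Prop := ∀ (s : String), Dom_fnv1_32 s → Spec_fnv1_32 s (fnv1_32 s)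

-- ===== LEMMAS AND PROOFS =====

-- with enough fuel, the divide-and-conquer recursion equals the left fold of the FNV step
theorem fnvGo_eq_foldl : ∀ (fuel : Nat) (data : List Nat), data.length ≤ fuel →
    ∀ h, fnvGo fuel data h = data.foldl fnvStep h := by
  intro fuel
  induction fuel with
  | zero =>
      intro data hlen h
      rcases data with _ | ⟨b, rest⟩
      · rfl
      · simp at hlen
  | succ n ih =>
      intro data hlen h
      show (if data.length = 0 then h
        else if data.length = 1 then fnvStep h data.headI
        else
          let m := data.length / 2
          fnvGo n (data.drop m) (fnvGo n (data.take m) h)) = _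
      split
      · next h0 =>
          rw [List.length_eq_zero_iff.mp h0]
          rfl
      · split
        · next _ h1 =>
            rcases List.length_eq_one_iff.mp h1 with ⟨b, rfl⟩
            rw [List.foldl_cons, List.foldl_nil, List.headI]
        · next h0 h1 =>
            have h1' : (List.take (data.length / 2) data).length ≤ n := by
              simp [List.length_take]; omega
            have h2' : (List.drop (data.length / 2) data).length ≤ n := by
              simp; omega
            simp only []
            rw [ih _ h1', ih _ h2', ← List.foldl_append, List.take_append_drop]

theorem fnvStep_eta :
    (fun (h b : Nat) => ((h * 16777619) % 4294967296) ^^^ b) = fnvStep := by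
  funext h b
  rfl

-- ===== VERDICT (by name: the statement is the Claim_ definition above) =====
theorem fnv1_32_spec : Claim_equal_fnv1_32 := by
  intro s _
  unfold Spec_fnv1_32 fnv1_32 fnv1_32_alt
  simp only []
  rw [fnvGo_eq_foldl _ _ (le_refl _), fnvStep_eta]
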